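-- pv_equiv track=rewrite | github.com/lht102/coding-problems-practice | leetcode/src/02566_maximum_difference_by_remapping_a_digit/solution.py | remap_digit
-- ===== SOURCE A (Python) =====
-- def remap_digit(num: int, x: int, y: int) -> int:
--     if x == y:
--         return num
--     res = num
--     rem = num
--     a = 1
--     while rem > 0:
--         if rem % 10 == x:
--             res += (y - x) * a
--         a *= 10
--         rem //= 10
--     return res
-- ===== SOURCE B (Python) =====
-- def remap_digit(num: int, x: int, y: int) -> int:
--     # Rebuild the number from its digits, substituting digit x by y.
--     if num <= 0:
--         return num
--     return _rebuild(num, x, y)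
--
--
-- def _rebuild(n: int, x: int, y: int) -> int:
--     if n == 0:
--         return 0
--     d = n % 10
--     return 10 * _rebuild(n // 10, x, y) + (y if d == x else d)
-- ===== Notes on version B (the rewrite author's own statement) =====
-- stated objective: simpler
-- what changed: A iterates with a place-value accumulator and adds a correction term (y-x)*place to the original number; B recursively rebuilds the number from its remapped digits with no correction arithmetic.
import Mathlib
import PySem

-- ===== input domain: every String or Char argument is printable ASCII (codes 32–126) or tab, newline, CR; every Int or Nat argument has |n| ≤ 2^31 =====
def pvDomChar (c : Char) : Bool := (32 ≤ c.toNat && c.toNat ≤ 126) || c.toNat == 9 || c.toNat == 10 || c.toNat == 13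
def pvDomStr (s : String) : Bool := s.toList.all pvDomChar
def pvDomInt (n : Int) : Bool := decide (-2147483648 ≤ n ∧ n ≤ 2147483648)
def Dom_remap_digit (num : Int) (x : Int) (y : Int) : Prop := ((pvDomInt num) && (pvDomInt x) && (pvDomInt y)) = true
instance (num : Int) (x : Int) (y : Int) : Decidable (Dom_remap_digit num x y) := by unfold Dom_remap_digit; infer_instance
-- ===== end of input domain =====

-- B rebuilds the number recursively from its remapped digits instead of A's
-- iterative correction-term accumulation; objective: simpler.


-- ===== PORT A =====
-- termination helper cited by both ports' decreasing_by
theorem pvDivTen_toNat_lt (n : Int) (h : 0 < n) : (n / 10).toNat < n.toNat := by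
  have h1 := Int.emod_add_mul_ediv n 10
  have h2 := Int.emod_nonneg n (by omega : (10:Int) ≠ 0)
  have h3 := Int.emod_lt_of_pos n (by omega : (0:Int) < 10)
  omega

-- the while loop of A: state (res, rem, a); terminates since rem // 10 < rem for rem > 0
def remapLoopA (res : Int) (rem : Int) (a : Int) (x : Int) (y : Int) : Int :=
  if h : 0 < rem then
    remapLoopA (if PySem.Int.mod rem 10 = x then res + (y - x) * a else res)
      (PySem.Int.floordiv rem 10) (a * 10) x y
  else res
termination_by rem.toNat
decreasing_by
  rw [PySem.Int.floordiv_eq_ediv_of_pos (by omega : (0:Int) < 10)]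
  exact pvDivTen_toNat_lt _ h

def remap_digit (num : Int) (x : Int) (y : Int) : Int :=
  if x = y then num
  else remapLoopA num num 1 x y

-- ===== PORT B =====
-- _rebuild of Source B; only reached with n ≥ 0 (Python's base case is n == 0, written
-- as the terminating '0 < n' test, identical on the n ≥ 0 inputs it is called on)
def pvRebuild (n : Int) (x : Int) (y : Int) : Int :=
  if h : 0 < n then
    let d := PySem.Int.mod n 10
    10 * pvRebuild (PySem.Int.floordiv n 10) x y + (if d = x then y else d)
  else 0
termination_by n.toNat
decreasing_by
  rw [PySem.Int.floordiv_eq_ediv_of_pos (by omega : (0:Int) < 10)]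
  exact pvDivTen_toNat_lt _ h

def remap_digit_alt (num : Int) (x : Int) (y : Int) : Int :=
  if num ≤ 0 then num
  else pvRebuild num x y

-- ===== PRECONDITION & SPEC =====
def Spec_remap_digit (num : Int) (x : Int) (y : Int) (out : Int) : Prop := out = remap_digit_alt num x y
instance (num : Int) (x : Int) (y : Int) (out : Int) : Decidable (Spec_remap_digit num x y out) := by unfold Spec_remap_digit; infer_instance

-- ===== CLAIM (what is proved, stated in full; the proofs are below) =====
def Claim_equal_remap_digit : Prop := ∀ (num : Int) (x : Int) (y : Int), Dom_remap_digit num x y → Spec_remap_digit num x y (remap_digit num x y)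

-- ===== LEMMAS AND PROOFS =====

-- A's loop adds, scaled by the running place value a, exactly the total correction
-- that B's rebuild applies to n.
theorem remapLoopA_eq_rebuild (k : Nat) : ∀ (n : Int), n.toNat ≤ k → 0 ≤ n →
    ∀ (res a x y : Int), remapLoopA res n a x y = res + a * (pvRebuild n x y - n) := by
  induction k with
  | zero =>
    intro n hk hn res a x y
    have hn0 : n = 0 := by omega
    subst hn0
    rw [remapLoopA, pvRebuild]
    simp
  | succ k ih =>
    intro n hk hn res a x y
    by_cases h : 0 < n
    · have hdiv : PySem.Int.floordiv n 10 = n / 10 :=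
        PySem.Int.floordiv_eq_ediv_of_pos (by omega)
      have hlt := pvDivTen_toNat_lt n h
      have hnn : 0 ≤ n / 10 := Int.ediv_nonneg hn (by omega)
      have hsum := PySem.Int.floordiv_mul_add_mod n 10
      rw [hdiv] at hsum
      rw [remapLoopA, pvRebuild]
      simp only [h, dif_pos, hdiv]
      rw [ih (n / 10) (by omega) hnn]
      by_cases hd : PySem.Int.mod n 10 = x
      · simp only [hd, if_pos]
        linear_combination a * hd - a * hsum
      · simp only [hd, if_neg, not_false_iff]
        linear_combination -a * hsum
    · have hn0 : n = 0 := by omega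
      subst hn0
      rw [remapLoopA, pvRebuild]
      simp

-- rebuilding with x = y reproduces the number
theorem pvRebuild_self (k : Nat) : ∀ (n : Int), n.toNat ≤ k → 0 ≤ n →
    ∀ (x : Int), pvRebuild n x x = n := by
  induction k with
  | zero =>
    intro n hk hn x
    have hn0 : n = 0 := by omega
    subst hn0; rw [pvRebuild]; simp
  | succ k ih =>
    intro n hk hn x
    by_cases h : 0 < n
    · have hdiv : PySem.Int.floordiv n 10 = n / 10 :=
        PySem.Int.floordiv_eq_ediv_of_pos (by omega)
      have hlt := pvDivTen_toNat_lt n h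
      have hnn : 0 ≤ n / 10 := Int.ediv_nonneg (le_of_lt h) (by omega)
      have hsum := PySem.Int.floordiv_mul_add_mod n 10
      rw [hdiv] at hsum
      rw [pvRebuild]
      simp only [h, dif_pos]
      rw [hdiv, ih (n / 10) (by omega) hnn]
      by_cases hd : PySem.Int.mod n 10 = x
      · simp only [hd, if_pos]; omega
      · simp only [hd, if_neg, not_false_iff]; omega
    · have hn0 : n = 0 := by omega
      subst hn0; rw [pvRebuild]; simp

-- ===== VERDICT (by name: the statement is the Claim_ definition above) =====
theorem remap_digit_spec : Claim_equal_remap_digit := by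
  intro num x y _
  unfold Spec_remap_digit remap_digit remap_digit_alt
  by_cases hxy : x = y
  · subst hxy
    by_cases hn : num ≤ 0
    · simp [hn]
    · simp only [if_neg hn]
      exact (pvRebuild_self num.toNat num le_rfl (by omega) x).symm
  · simp only [if_neg hxy]
    by_cases hn : num ≤ 0
    · rw [if_pos hn, remapLoopA]
      simp [show ¬ 0 < num by omega]
    · rw [if_neg hn]
      rw [remapLoopA_eq_rebuild num.toNat num le_rfl (by omega)]
      ring
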